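-- pv_equiv track=rewrite | github.com/KennyGitCode/ShopeeOrderSync | app.py | _smart_default_pick_index
-- ===== SOURCE A (Python) =====
-- def _smart_default_pick_index(
--     options: list[tuple[str, int | None]],
--     blocked_rows: set[int],
--     occupied_rows: set[int],
-- ) -> int | None:
--     """
--     預設先選未重複列；options 既有順序已把字典命中放前面。
--     """
--     if not options:
--         return None
--     for i, (_, sr) in enumerate(options):
--         if (
--             isinstance(sr, int)
--             and sr > 0
--             and sr not in blocked_rows
--             and sr not in occupied_rows
--         ):
--             return i
--     for i, (_, sr) in enumerate(options):
--         if isinstance(sr, int) and sr > 0 and sr not in blocked_rows: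
--             return i
--     return 0
-- ===== SOURCE B (Python) =====
-- def _smart_default_pick_index(options, blocked_rows, occupied_rows):
--     if not options:
--         return None
--     fallback = None
--     for i, (_, sr) in enumerate(options):
--         weak = isinstance(sr, int) and sr > 0 and sr not in blocked_rows
--         if weak and sr not in occupied_rows:
--             return i
--         if weak and fallback is None:
--             fallback = i
--     return fallback if fallback is not None else 0
-- ===== Notes on version B (the rewrite author's own statement) =====
-- stated objective: simpler
-- what changed: Replaces A's two separate full scans (strong pass, then weak pass) with a single loop that returns the first strong index immediately and remembers the first weak index as a fallback.
import Mathlib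
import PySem

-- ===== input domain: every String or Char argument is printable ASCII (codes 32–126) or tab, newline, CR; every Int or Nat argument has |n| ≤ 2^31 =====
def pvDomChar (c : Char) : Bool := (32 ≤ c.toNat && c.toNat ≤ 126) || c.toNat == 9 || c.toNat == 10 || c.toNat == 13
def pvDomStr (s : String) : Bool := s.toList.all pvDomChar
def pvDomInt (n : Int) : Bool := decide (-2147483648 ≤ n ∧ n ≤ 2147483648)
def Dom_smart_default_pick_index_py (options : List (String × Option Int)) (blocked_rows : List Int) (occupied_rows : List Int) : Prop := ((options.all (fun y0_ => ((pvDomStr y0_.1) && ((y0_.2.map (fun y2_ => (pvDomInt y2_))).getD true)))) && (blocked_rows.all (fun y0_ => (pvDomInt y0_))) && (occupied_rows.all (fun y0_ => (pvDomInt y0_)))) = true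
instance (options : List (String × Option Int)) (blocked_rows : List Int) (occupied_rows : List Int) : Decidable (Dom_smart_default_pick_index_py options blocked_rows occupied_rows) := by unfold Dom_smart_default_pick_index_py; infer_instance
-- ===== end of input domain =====

-- ===== PORT A =====
-- B merges A's two scans into one loop with a first-weak fallback; return-value equivalence proved below.

-- first scan of A: first index whose row is a positive int, not blocked and not occupied
def pvFirstStrong (opts : List (String × Option Int)) (i : Int) (blocked occupied : List Int) : Option Int :=
  match opts with
  | [] => none
  | (_, sr) :: t =>
    match sr with
    | some v =>
      if v > 0 && !(blocked.contains v) && !(occupied.contains v) then some i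
      else pvFirstStrong t (i + 1) blocked occupied
    | none => pvFirstStrong t (i + 1) blocked occupied

-- second scan of A: first index whose row is a positive int and not blocked
def pvFirstWeak (opts : List (String × Option Int)) (i : Int) (blocked : List Int) : Option Int :=
  match opts with
  | [] => none
  | (_, sr) :: t =>
    match sr with
    | some v =>
      if v > 0 && !(blocked.contains v) then some i
      else pvFirstWeak t (i + 1) blocked
    | none => pvFirstWeak t (i + 1) blocked

def smart_default_pick_index_py (options : List (String × Option Int)) (blocked_rows : List Int) (occupied_rows : List Int) : Option Int :=
  if options.isEmpty then none
  else
    match pvFirstStrong options 0 blocked_rows occupied_rows with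
    | some i => some i
    | none =>
      match pvFirstWeak options 0 blocked_rows with
      | some i => some i
      | none => some 0

-- ===== PORT B =====
-- single loop of B: return first strong index; remember the first weak index in fb
def pvLoopB (opts : List (String × Option Int)) (i : Int) (blocked occupied : List Int) (fb : Option Int) : Option Int :=
  match opts with
  | [] =>
    match fb with
    | some j => some j
    | none => some 0
  | (_, sr) :: t =>
    let weak := match sr with
      | some v => v > 0 && !(blocked.contains v)
      | none => false
    let strong := weak && (match sr with
      | some v => !(occupied.contains v)
      | none => false)
    if strong then some i
    else pvLoopB t (i + 1) blocked occupied (if weak && fb.isNone then some i else fb)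

def smart_default_pick_index_py_alt (options : List (String × Option Int)) (blocked_rows : List Int) (occupied_rows : List Int) : Option Int :=
  if options.isEmpty then none
  else pvLoopB options 0 blocked_rows occupied_rows none

-- ===== PRECONDITION & SPEC =====
def Spec_smart_default_pick_index_py (options : List (String × Option Int)) (blocked_rows : List Int) (occupied_rows : List Int) (out : Option Int) : Prop := out = smart_default_pick_index_py_alt options blocked_rows occupied_rows
instance (options : List (String × Option Int)) (blocked_rows : List Int) (occupied_rows : List Int) (out : Option Int) : Decidable (Spec_smart_default_pick_index_py options blocked_rows occupied_rows out) := by unfold Spec_smart_default_pick_index_py; infer_instance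

-- ===== CLAIM (what is proved, stated in full; the proofs are below) =====
def Claim_equal_smart_default_pick_index_py : Prop := ∀ (options : List (String × Option Int)) (blocked_rows : List Int) (occupied_rows : List Int), Dom_smart_default_pick_index_py options blocked_rows occupied_rows → Spec_smart_default_pick_index_py options blocked_rows occupied_rows (smart_default_pick_index_py options blocked_rows occupied_rows)

-- ===== LEMMAS AND PROOFS =====

theorem pvLoopB_eq (opts : List (String × Option Int)) (blocked occupied : List Int) :
    ∀ (i : Int) (fb : Option Int),
    pvLoopB opts i blocked occupied fb =
      match pvFirstStrong opts i blocked occupied with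
      | some j => some j
      | none =>
        match fb with
        | some j => some j
        | none =>
          match pvFirstWeak opts i blocked with
          | some j => some j
          | none => some 0 := by
  induction opts with
  | nil => intro i fb; cases fb <;> simp [pvLoopB, pvFirstStrong, pvFirstWeak]
  | cons h t ih =>
    intro i fb
    obtain ⟨s, sr⟩ := h
    cases sr with
    | none =>
      simp only [pvLoopB, pvFirstStrong, pvFirstWeak, Bool.false_and, Bool.and_false,
        if_neg (by simp : ¬ (false = true))]
      exact ih (i + 1) fb
    | some v =>
      simp only [pvLoopB, pvFirstStrong, pvFirstWeak]
      rcases Bool.eq_false_or_eq_true (v > 0 && !(blocked.contains v)) with hw | hw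
      case inr =>
        simp only [hw, Bool.false_and, if_neg (by simp : ¬ (false = true))]
        exact ih (i + 1) fb
      case inl =>
        simp only [hw, Bool.true_and]
        by_cases ho : occupied.contains v = true
        · simp only [ho, Bool.not_true, if_neg (by simp : ¬ (false = true))]
          cases fb with
          | none =>
            simp only [Option.isNone_none, if_pos trivial]
            rw [ih (i + 1) (some i)]
          | some j =>
            simp only [Option.isNone_some,
              if_neg (by simp : ¬ (false = true))]
            rw [ih (i + 1) (some j)]
        · have ho' : occupied.contains v = false := by
            revert ho; cases occupied.contains v <;> simp
          have hm : ¬ (v ∈ occupied) := by simpa using ho'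
          simp [hm]

-- ===== VERDICT (by name: the statement is the Claim_ definition above) =====
theorem smart_default_pick_index_py_spec : Claim_equal_smart_default_pick_index_py := by
  intro options blocked occupied _
  unfold Spec_smart_default_pick_index_py smart_default_pick_index_py smart_default_pick_index_py_alt
  by_cases h : options.isEmpty
  · simp [h]
  · simp only [h]
    rw [pvLoopB_eq]
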